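/- GENERATED by mk_final_copies.py from the proof of the farm's unit `start_decoder.C14b` (farm:start_decoder.C14b.1: Lemmas.lean) as the
   re-elaboration sweep compiled it — do not edit. -/
import Asan.CheckWalk
import Vorbis.Spec.Units.start_decoder_C14b
import Vorbis.Spec.StartDecoderCarry
import Vorbis.Spec.StartDecoderATest

/-!
  The unit `start_decoder.C14b` (0x1150ca … 0x1150ec + the failure arm 0x1150ee … 0x11511c): the checked store
  `c->multiplicands = rax`, the NULL test; not NULL: `j = 0`, `last = 0`, the head of loop 3937; NULL: `setup_temp_free(f, mults, 2·LV)`,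
  `error(f, 3)`, the jump to the epilogue. One lemma per stretch between call returns:
      c14b_site        a check site inside the struct `cb(i)`
      c14bWin          what the segment's own stores may hit; c14b_core: `Frame`, `Cur`, K1 – K5, `mults` of `In14A` over such stores
      c14b_fields      D, E, LT, LV read the same when the first 32 bytes of the struct are kept
      c14b_build       PURE: `In14L` with `j = 0` (success arm);  c14b_fail_build  PURE: `C14bFail` (NULL arm)
      c14b_head        walk 1: 0x1150ca → 0x115129 (`At14L 0`) ∨ 0x1150fc (`C14bFail`, the return of the check of `c->lookup_values`)
      c14b_free        walk 2: 0x1150fc → 0x11510f (`C14bFreed`): `call setup_temp_free` by `Cur.free_call`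
      c14b_err         walk 3: 0x11510f → 0x113b22 (`AtERR`): `call error`, `Frame.step` / `Cur.step`, `Cur.failed`
-/

open X86 X86.User Asan Vorbis Vorbis.Spec Vorbis.Spec.StartDecoder

set_option maxRecDepth 100000
set_option maxHeartbeats 4000000

namespace Vorbis.Spec.start_decoder_C14b

/-- **A check site inside the struct `cb(i)`** (`k` bytes at `c + off`, `c = codebooks + 2120·i`): inside the codebooks block
(`CodebooksOK` over the function's block predicate: `SDw.cb0`), which is live (`Env.live`). -/
theorem c14b_site {g : Ghost} {i : Nat} {A2 A3 Ai : Arena} {A : Arena × List Obj} {v : State}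
    (hc : Cur g i A2 A3 Ai A v) (off k : Nat) (h1 : 1 ≤ k) (h2 : off + k ≤ 2120) :
    Site (Live (stackObjs g.frames' ++ A.2)) (g.cb v.mem i + off) k := by
  rcases (hc.sd.cb0 (by omega)).1 with h0 | hok
  · exact absurd h0 (hc.sd.cb0 (by omega)).2
  · exact hok.site_cb_field hc.sd.env.live i hc.lt off k h2 h1 rfl


/-- **A window this segment may write**: the stack below the steady `R` (the return addresses of the check calls), the float local
`d[R+38H]` (`last`), and the field `multiplicands` `[c + 32, c + 40)` of the struct `cb(i)` at `c`. -/
def c14bWin (g : Ghost) (c : Nat) (x : Span) : Prop :=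
  (g.R - 408 ≤ x.lo ∧ x.hi ≤ g.R) ∨ (g.R + 0x38 ≤ x.lo ∧ x.hi ≤ g.R + 0x3c) ∨ (c + 32 ≤ x.lo ∧ x.hi ≤ c + 40)

set_option maxHeartbeats 2000000 in
/-- **THE CARRY OF `In14A` over the segment's own stores** (`c14bWin`: pushed return addresses, `last`, the field `multiplicands`):
`Frame` at the new program counter, `Cur`, `cb(i)` unmoved, K1 – K5 (`K15.of_kept`: they do not read `multiplicands`), the first 32
bytes of the struct kept (LT, LV, E, D read the same), and the slot of `mults`. -/
theorem c14b_core {u₀ : State} {g : Ghost} {i : Nat} {A2 A3 Ai Am : Arena} {A : Arena × List Obj} {mults : Nat}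
    {v w : State} {ws : List Span} {pc' : Word}
    (h : In14A u₀ g i A2 A3 Ai Am A mults v)
    (hs : Mem.SameExcept ws v.mem w.mem) (hun : ShadowUntouched v.mem w.mem)
    (hq : ∀ x, x ∈ ws → c14bWin g (g.cb v.mem i) x)
    (hrip : w.rip = pc') (hrsp : w.reg .rsp = v.reg .rsp) (hcode : CodeOK u₀ w.mem) (hinv : abiInv w)
    (hr14 : w.reg .r14 = v.reg .r14) :
    Frame u₀ g pc' A w ∧ Cur g i A2 A3 Ai A w ∧ g.cb w.mem i = g.cb v.mem i ∧
      K15 (Since Ai Am) w.mem (g.cb v.mem i) ∧ (Block.mk (g.cb v.mem i) 32).Kept v.mem w.mem ∧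
      w.mem.u64 (g.R + 0x28) = mults := by
  have hfr := h.frame
  have hpos : Pos g A := Pos.of hfr h.cur
  have hm0 : MInv g i A2 A3 Ai A v.mem := MInv.of hfr h.cur
  have ha : ArenaOK A.1 A.2 v.mem g.f := h.cur.sd.arena
  have hcw := hm0.c_where
  have p1 := hpos.r_eq
  have p2 := hpos.ra_lo
  have p3 := hpos.ra_hi
  have p4 := hpos.ar_stack
  have p5 := hpos.objOut
  have p6 := hpos.ar_hi
  have hok : ∀ x, x ∈ ws → OkWin g Ai A (g.cb v.mem i) x := by
    intro x hx
    have k := hq x hx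
    left
    unfold c14bWin at k
    unfold OkWin0
    omega
  have hb : Bits (g.Blk A) g.len w.mem g.f := by
    apply bits_kept hpos hm0.sd.bits hs
    intro x hx
    have k := hq x hx
    unfold c14bWin at k
    omega
  have hF := Frame.step hfr h.cur hs hun hok hb hrip hrsp hcode hinv
  obtain ⟨hC, hcb⟩ := Cur.step hfr h.cur hs hun hok hb hr14
  -- the two parts of the struct around the field `multiplicands`
  have hlo : (Block.mk (g.cb v.mem i) 32).Kept v.mem w.mem := by
    apply Block.Kept.of_sameExcept hs
    · intro x hx
      have k := hq x hx
      unfold c14bWin at k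
      simp only []
      omega
    · simp only []
      omega
  have hhi : (Block.mk (g.cb v.mem i + 40) 2080).Kept v.mem w.mem := by
    apply Block.Kept.of_sameExcept hs
    · intro x hx
      have k := hq x hx
      unfold c14bWin at k
      simp only []
      omega
    · simp only []
      omega
  -- the `sorted_values` block: allocated since `Ai`, off the struct, inside the arena
  have hsv : 1 ≤ Codebook.sorted_entries v.mem (g.cb v.mem i) →
      (Codebook.svBlock v.mem (g.cb v.mem i)).Kept v.mem w.mem := by
    intro hse
    have hsvm : Since Ai A.1 (Codebook.svBlock v.mem (g.cb v.mem i)) := (h.k.k4.sv hse).mono h.extm'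
    generalize Codebook.svBlock v.mem (g.cb v.mem i) = SV at hsvm ⊢
    obtain ⟨hin, hoff⟩ := young_off_book hm0 hsvm
    apply Block.Kept.of_sameExcept hs
    · intro x hx
      have k := hq x hx
      unfold c14bWin at k
      omega
    · omega
  have hk : K15 (Since Ai Am) w.mem (g.cb v.mem i) := h.k.of_kept hlo hhi hsv
  -- the slot of `mults`
  have hst : Mem.EqOn (g.R + 0x28) (g.R + 0x30) v.mem w.mem := by
    apply hs.eqOn
    intro x hx
    have k := hq x hx
    unfold c14bWin at k
    omega
  have e28 := hst.u64 (g.R + 0x28) (Nat.le_refl _) (by omega) (by omega)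
  exact ⟨hF, hC, hcb, hk, hlo, by rw [e28]; exact h.mults.slot⟩


/-- **The fields of the first 32 bytes of the struct** (D, E, LT, LV) read the same when that part is kept. -/
theorem c14b_fields {m m' : Mem} {c : Nat} (hlo : (Block.mk c 32).Kept m m') :
    Codebook.dimensions m' c = Codebook.dimensions m c ∧ Codebook.entries m' c = Codebook.entries m c ∧
      Codebook.lookup_type m' c = Codebook.lookup_type m c ∧ Codebook.lookup_values m' c = Codebook.lookup_values m c := by
  refine ⟨?_, ?_, ?_, ?_⟩
  · simp only [vacc, voff]
    exact hlo.i32 _ (by simp only []; omega) (by simp only []; omega)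
  · simp only [vacc, voff]
    exact hlo.i32 _ (by simp only []; omega) (by simp only []; omega)
  · simp only [vacc, voff]
    exact hlo.u8 _ (by simp only []; omega) (by simp only []; omega)
  · simp only [vacc, voff]
    exact hlo.u32 _ (by simp only []; omega) (by simp only []; omega)

/-- **`In14L` with `j = 0` at the loop head, pure part** (the success arm): from `In14A` at the cut point `v`, the segment's stores as
ONE footprint of `c14bWin` windows, the stored pointer read back (`multiplicands = rax ≠ 0`: the allocator's block, `In14A.alloc`)
and `r12 = 0`. -/
theorem c14b_build {u₀ : State} {g : Ghost} {i : Nat} {A2 A3 Ai Am : Arena} {A : Arena × List Obj} {mults : Nat}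
    {v w : State} {ws : List Span}
    (h : In14A u₀ g i A2 A3 Ai Am A mults v)
    (hs : Mem.SameExcept ws v.mem w.mem) (hun : ShadowUntouched v.mem w.mem)
    (hq : ∀ x, x ∈ ws → c14bWin g (g.cb v.mem i) x)
    (hrip : w.rip = L.start_decoder.loop14) (hrsp : w.reg .rsp = v.reg .rsp) (hcode : CodeOK u₀ w.mem) (hinv : abiInv w)
    (hr14 : w.reg .r14 = v.reg .r14)
    (hmu : Codebook.multiplicands w.mem (g.cb v.mem i) = (v.reg .rax).toNat) (hne : ¬ (v.reg .rax).toNat = 0)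
    (hr12 : w.reg .r12 = addr 0) : In14L u₀ g i A2 A3 Ai Am A mults 0 w := by
  obtain ⟨hF, hC, hcb, hk, hlo, hslot⟩ := c14b_core h hs hun hq hrip hrsp hcode hinv hr14
  obtain ⟨e_d, e_e, e_lt, e_lv⟩ := c14b_fields hlo
  have hsince : Since Am A.1 ⟨(v.reg .rax).toNat, 4 * Codebook.lookup_values v.mem (g.cb v.mem i)⟩ := by
    rcases h.alloc with h0 | hsi
    · rw [h0] at hne
      exact absurd rfl hne
    · exact hsi
  exact
    { frame := hF
      cur := hC
      extm := h.extm
      extm' := h.extm'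
      k := by rw [hcb]; exact hk
      type2 := by rw [hcb, e_lt]; exact h.type2
      lv_eq := by rw [hcb, e_lv, e_e, e_d]; exact h.lv_eq
      lv_le := by rw [hcb, e_lv]; exact h.lv_le
      mults :=
        { slot := hslot
          temps := by rw [hcb, e_lv]; exact h.mults.temps
          lv_pos := by rw [hcb, e_lv]; exact h.mults.lv_pos
          lv_lt := by rw [hcb, e_lv]; exact h.mults.lv_lt }
      mu := by rw [hcb, hmu, e_lv]; exact hsince
      r12 := hr12
      j_le := Nat.zero_le _ }

/-- **The assertion at 0x1150fc** (`ret279`, the return of the check of `c->lookup_values` on the NULL arm): CUR(i) with the `mults`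
temp block still outstanding, `rbp = f` (reloaded from `q[R+18H]` at 0x1150ee). The struct is as at the cut point (`multiplicands = 0`
was stored over 0). -/
structure C14bFail (u₀ : State) (g : Ghost) (i : Nat) (A2 A3 Ai : Arena) (A : Arena × List Obj) (mults : Nat) (w : State) :
    Prop where
  frame : Frame u₀ g L.start_decoder.ret279 A w
  cur : Cur g i A2 A3 Ai A w
  mults : Mults g A w.mem (g.cb w.mem i) mults
  rbp : w.reg .rbp = addr g.f

/-- **`C14bFail` at 0x1150fc, pure part** (the NULL arm): from `In14A` at the cut point `v` and the stretch's stores as ONE footprint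
of `c14bWin` windows (two pushed return addresses, the store of `multiplicands`). -/
theorem c14b_fail_build {u₀ : State} {g : Ghost} {i : Nat} {A2 A3 Ai Am : Arena} {A : Arena × List Obj} {mults : Nat}
    {v w : State} {ws : List Span}
    (h : In14A u₀ g i A2 A3 Ai Am A mults v)
    (hs : Mem.SameExcept ws v.mem w.mem) (hun : ShadowUntouched v.mem w.mem)
    (hq : ∀ x, x ∈ ws → c14bWin g (g.cb v.mem i) x)
    (hrip : w.rip = L.start_decoder.ret279) (hrsp : w.reg .rsp = v.reg .rsp) (hcode : CodeOK u₀ w.mem) (hinv : abiInv w)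
    (hr14 : w.reg .r14 = v.reg .r14) (hrbp : w.reg .rbp = addr g.f) : C14bFail u₀ g i A2 A3 Ai A mults w := by
  obtain ⟨hF, hC, hcb, hk, hlo, hslot⟩ := c14b_core h hs hun hq hrip hrsp hcode hinv hr14
  obtain ⟨e_d, e_e, e_lt, e_lv⟩ := c14b_fields hlo
  exact
    { frame := hF
      cur := hC
      mults :=
        { slot := hslot
          temps := by rw [hcb, e_lv]; exact h.mults.temps
          lv_pos := by rw [hcb, e_lv]; exact h.mults.lv_pos
          lv_lt := by rw [hcb, e_lv]; exact h.mults.lv_lt }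
      rbp := hrbp }

/-- Segment C14b, first walk: the checked store `c->multiplicands = rax`, the NULL test; not NULL: `j = 0`, `last = 0`, the loop
head (`c14b_build`); NULL: the reload of `f`, the check of `c->lookup_values`, up to its return (`C14bFail`). -/
theorem c14b_head
    (Lay : Layout) (hLay : Lay.hi = 0x1000000) (μ : Microarch) (hμ : UserX.MicroOK μ) (u₀ : State)
    (hcode : HasCodeNat Lay u₀ Vorbis.L.start_decoder.entry Vorbis.Code.code_start_decoder.nat Vorbis.L.start_decoder.size)
    (h_store8 : Asan.SmallCheck Lay μ Vorbis.WayInv (Vorbis.CodeOK u₀) [.rax, .rcx, .rdx] 8 Vorbis.L.__asan_store8_noabort.entry)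
    (h_load4 : Asan.SmallCheck Lay μ Vorbis.WayInv (Vorbis.CodeOK u₀) [.rax, .rcx, .rdx] 4 Vorbis.L.__asan_load4_noabort.entry)
    (g : Ghost) (i : Nat) (A2 A3 Ai Am : Arena) (A : Arena × List Obj) (mults : Nat) (v : State)
    (h : In14A u₀ g i A2 A3 Ai Am A mults v) :
    ReachVia Lay μ WayInv v (fun w => At14L u₀ g i 0 w ∨ C14bFail u₀ g i A2 A3 Ai A mults w) := by
  have hfr := h.frame
  have he := hfr.entry
  v_entry he
  simp only [depth] at he_room he_stack
  have w_rip := hfr.rip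
  have w_eq : Mem.EqOn Vorbis.L.textLo Vorbis.L.textHi u₀.mem v.mem := hfr.code
  have hdf : v.flags .df = false := (show abiInv _ from hfr.inv).1
  have hmx : v.mxcsr &&& 0x1F80 = 0x1F80 := (show abiInv _ from hfr.inv).2
  have hsse := Vorbis.sseOK_of_abiInv hfr.inv
  have hRA : g.RA = (g.e.reg .rsp).toNat := rfl
  have hpos : Pos g A := Pos.of hfr h.cur
  have hm0 : MInv g i A2 A3 Ai A v.mem := MInv.of hfr h.cur
  have hcw := hm0.c_where
  have p1 := hpos.r_eq
  have p2 := hpos.ra_lo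
  have p3 := hpos.ra_hi
  have hsp : (v.reg .rsp).toNat = g.R := by
    rw [hfr.rsp]
    exact toNat_addr _ (by omega)
  have c_r14 := h.cur.r14
  have hslotm : v.mem.readLE (v.reg .rsp + 40) 8 = mults := by
    have := h.mults.slot
    rw [hfr.rsp]
    simp only [vfield]
    exact this
  have hslotf : v.mem.readLE (v.reg .rsp + 24) 8 = g.f := by
    have := h.cur.slot_f
    rw [hfr.rsp]
    simp only [vfield]
    exact this
  have hz24 : v.mem.readLE (v.reg .rsp + 36) 4 = 0 := by
    have := h.cur.sd.frame.z24 (by omega) (by omega)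
    rw [hfr.rsp]
    simp only [vfield]
    exact this
  have hsite0 := c14b_site h.cur 32 8 (by decide) (by decide)
  have hsite1 := c14b_site h.cur 28 4 (by decide) (by decide)
  have hwh0 := Vorbis.Spec.site_where hfr.shadow hfr.offText (by omega) hsite0
  have hwh1 := Vorbis.Spec.site_where hfr.shadow hfr.offText (by omega) hsite1
  have e : L.textHi = 0x119d40 := rfl
  have ecb : (addr (g.cb v.mem i)).toNat = g.cb v.mem i := toNat_addr _ (by omega)
  u_walk hcode [hμ.vendor] until [Vorbis.L.start_decoder.loop14, Vorbis.L.start_decoder.ret279] span [Vorbis.L.textLo, Vorbis.L.textHi] side (first | v_side | (simp only [addr]; v_side))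
  · -- 0x1150d1: the check of the store `c->multiplicands`
    have hun : ShadowUntouched v.mem s_1150d1.mem := by v_untouched
    exact Vorbis.Spec.check_site hfr.shadow hun hsite0 (by u_omega)
  · -- the store misses the text
    right
    have e32 : (addr (g.cb v.mem i) + 32).toNat = g.cb v.mem i + 32 := by
      rw [addr_add_lit, toNat_addr _ (by omega)]
    rw [e32]
    omega
  · -- 0x1150f7: the check of the load `c->lookup_values`
    have hun : ShadowUntouched v.mem s_1150f7.mem := by v_untouched
    exact Vorbis.Spec.check_site hfr.shadow hun hsite1 (by u_omega)
  · -- 0x1150fc: `rax = 0`, the check of `c->lookup_values` returned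
    have hun : ShadowUntouched v.mem s_1150f7r.mem := by v_untouched
    have hinv : (conv u₀).inv s_1150f7r := by v_inv
    have hs : Mem.SameExcept [⟨(v.reg .rsp).toNat - 8, (v.reg .rsp).toNat⟩,
        ⟨(addr (g.cb v.mem i)).toNat + 32, (addr (g.cb v.mem i)).toNat + 40⟩] v.mem s_1150f7r.mem := by
      u_same
    rw [hsp, ecb] at hs
    have hq : ∀ x, x ∈ [(⟨g.R - 8, g.R⟩ : Span), ⟨g.cb v.mem i + 32, g.cb v.mem i + 40⟩] →
        c14bWin g (g.cb v.mem i) x := by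
      intro x hx
      simp only [List.mem_cons, List.mem_nil_iff, or_false] at hx
      unfold c14bWin
      rcases hx with rfl | rfl
      · left
        simp only []
        omega
      · right
        right
        simp only []
        omega
    have hout := c14b_fail_build h hs hun hq w_rip w_rsp w_eq hinv (w_kept.get .r14 rfl) w_rbp
    exact ReachVia.done (Or.inr hout)
  · -- 0x115129: `rax ≠ 0`, the loop head with `j = 0`
    have hun : ShadowUntouched v.mem s_1150ec.mem := by v_untouched
    have hinv : (conv u₀).inv s_1150ec := by v_inv
    have hs : Mem.SameExcept [⟨(v.reg .rsp).toNat - 8, (v.reg .rsp).toNat⟩,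
        ⟨(addr (g.cb v.mem i)).toNat + 32, (addr (g.cb v.mem i)).toNat + 40⟩,
        ⟨(v.reg .rsp).toNat + 56, (v.reg .rsp).toNat + 60⟩] v.mem s_1150ec.mem := by
      u_same
    rw [hsp, ecb] at hs
    have hq : ∀ x, x ∈ [(⟨g.R - 8, g.R⟩ : Span), ⟨g.cb v.mem i + 32, g.cb v.mem i + 40⟩, ⟨g.R + 56, g.R + 60⟩] →
        c14bWin g (g.cb v.mem i) x := by
      intro x hx
      simp only [List.mem_cons, List.mem_nil_iff, or_false] at hx
      unfold c14bWin
      rcases hx with rfl | rfl | rfl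
      · left
        simp only []
        omega
      · right
        right
        simp only []
        omega
      · right
        left
        simp only []
        omega
    have hmu : Codebook.multiplicands s_1150ec.mem (g.cb v.mem i) = (v.reg .rax).toNat := by
      simp only [vacc, voff]
      show s_1150ec.mem.readLE (addr (g.cb v.mem i + 32)) 8 = _
      rw [← addr_add_lit]
      have hx : UInt64.ofNat (s_1150ec.mem.readLE (addr (g.cb v.mem i) + 32) 8) = v.reg .rax := by
        u_resolve
      have hlt := Mem.readLE_lt' s_1150ec.mem (addr (g.cb v.mem i) + 32) 8
      rw [← hx, UInt64.toNat_ofNat']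
      omega
    have hr12 : s_1150ec.reg .r12 = addr 0 := by
      rw [w_r12]
      rfl
    have hout := c14b_build h hs hun hq w_rip w_rsp w_eq hinv (w_kept.get .r14 rfl) hmu hbr_1150dd hr12
    exact ReachVia.done (Or.inl ⟨A, mults, A2, A3, Ai, Am, hout⟩)

/-- **The assertion at 0x11510f** (`cut178`, the return of `setup_temp_free(f, mults, 2·LV)`): CUR(i) over the ghost `A'` without the
`mults` temp block, `rbp = f`. -/
structure C14bFreed (u₀ : State) (g : Ghost) (i : Nat) (A2 A3 Ai : Arena) (A' : Arena × List Obj) (w : State) : Prop where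
  frame : Frame u₀ g L.start_decoder.cut178 A' w
  cur : Cur g i A2 A3 Ai A' w
  rbp : w.reg .rbp = addr g.f

/-- **Where `*f` is** (a stack object of stb_vorbis_open_memory, or an object of `A.2`): ONE live object of the function's live list. -/
theorem c14b_obj_live {g : Ghost} {i : Nat} {A2 A3 Ai : Arena} {A : Arena × List Obj} {v : State} (h : Cur g i A2 A3 Ai A v) :
    LiveIn A.2 g.frames' g.f Off.sizeof.stb_vorbis := by
  apply h.hand.obj.mono
  intro o ho
  unfold Ghost.frames'
  rw [stackObjs_cons]
  rcases List.mem_append.mp ho with hs | ho'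
  · exact List.mem_append_left _ (List.mem_append_right _ hs)
  · exact List.mem_append_right _ ho'

/-- **The allocator layer's precondition at a call** (`ArenaPre`): the state `s` at the callee's entry has the memory of the cut point
but for the pushed return address below `R` (`hmem`), `rsp = R − 8`, `rdi = f`. -/
theorem c14b_arena_pre {u₀ : State} {g : Ghost} {i : Nat} {A2 A3 Ai : Arena} {A : Arena × List Obj} {pc : Word} {v s : State}
    (hfr : Frame u₀ g pc A v) (hcur : Cur g i A2 A3 Ai A v) (hun : ShadowUntouched v.mem s.mem)
    (hmem : Mem.EqOn (g.f + 112) (g.f + 136) v.mem s.mem) (hrsp : (s.reg .rsp).toNat + 8 = g.R)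
    (hrdi : (s.reg .rdi).toNat = g.f) : ArenaPre A.1 A.2 g.frames' s := by
  have hob := hcur.sd.bits.OB1
  have hpos := Pos.of hfr hcur
  have hf2 := hpos.f_hi
  refine ⟨⟨?_, hfr.offText⟩, ?_, ?_, hcur.hand.arenaText⟩
  · rw [hrsp]
    exact hfr.shadow.untouched hun
  · rw [hrdi]
    exact hcur.sd.env.live _ hob
  · rw [hrdi]
    apply hcur.sd.arena.frame (by simp only [voff]; omega)
    simp only [voff]
    exact hmem

/-- Segment C14b, second walk (the NULL arm): `edx = 2·LV`, `rsi = mults`, `rdi = f`, `call setup_temp_free`: the LIFO release of the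
`mults` temp block (`Cur.free_call`). -/
theorem c14b_free
    (Lay : Layout) (hLay : Lay.hi = 0x1000000) (μ : Microarch) (hμ : UserX.MicroOK μ) (u₀ : State)
    (hcode : HasCodeNat Lay u₀ Vorbis.L.start_decoder.entry Vorbis.Code.code_start_decoder.nat Vorbis.L.start_decoder.size)
    (h_free : ∀ (others : List Obj) (frames : List (Nat × FrameLayout)) (A : Arena) (m : Nat) (rest : List (Nat × Nat)), Calls Lay μ Vorbis.WayInv (Vorbis.conv u₀) Vorbis.L.setup_temp_free.entry (Vorbis.Spec.setup_temp_free.spec others frames A m rest))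
    (g : Ghost) (i : Nat) (A2 A3 Ai : Arena) (A : Arena × List Obj) (mults : Nat) (v : State)
    (h : C14bFail u₀ g i A2 A3 Ai A mults v) :
    ReachVia Lay μ WayInv v (fun w => ∃ A', C14bFreed u₀ g i A2 A3 Ai A' w) := by
  have hfr := h.frame
  have hcur := h.cur
  have he := hfr.entry
  v_entry he
  simp only [depth] at he_room he_stack
  have w_rip := hfr.rip
  have w_eq : Mem.EqOn Vorbis.L.textLo Vorbis.L.textHi u₀.mem v.mem := hfr.code
  have hdf : v.flags .df = false := (show abiInv _ from hfr.inv).1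
  have hmx : v.mxcsr &&& 0x1F80 = 0x1F80 := (show abiInv _ from hfr.inv).2
  have hsse := Vorbis.sseOK_of_abiInv hfr.inv
  have hRA : g.RA = (g.e.reg .rsp).toNat := rfl
  have hpos : Pos g A := Pos.of hfr hcur
  have hm0 : MInv g i A2 A3 Ai A v.mem := MInv.of hfr hcur
  have hcw := hm0.c_where
  have p1 := hpos.r_eq
  have p2 := hpos.ra_lo
  have p3 := hpos.ra_hi
  have p4 := hpos.f_stack
  have p5 := hpos.f_hi
  have p6 := hpos.ar_lo
  have p7 := hpos.ar_hi
  have hsp : (v.reg .rsp).toNat = g.R := by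
    rw [hfr.rsp]
    exact toNat_addr _ (by omega)
  have c_r14 := hcur.r14
  have c_rbp := h.rbp
  have hslotm : v.mem.readLE (v.reg .rsp + 40) 8 = mults := by
    have := h.mults.slot
    rw [hfr.rsp]
    simp only [vfield]
    exact this
  have hLV : v.mem.readLE (addr (g.cb v.mem i) + 28) 4 = Codebook.lookup_values v.mem (g.cb v.mem i) := by
    simp only [vacc, voff, Mem.u32, addr_add_lit]
  have hsite1 := c14b_site hcur 28 4 (by decide) (by decide)
  have hwh1 := Vorbis.Spec.site_where hfr.shadow hfr.offText (by omega) hsite1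
  have e : L.textHi = 0x119d40 := rfl
  have ecb : (addr (g.cb v.mem i)).toNat = g.cb v.mem i := toNat_addr _ (by omega)
  -- the LIFO ghost: the one temp block is `mults`, at `B + T`
  have harena := hcur.sd.arena
  have hlv1 := h.mults.lv_pos
  have hlv2 := h.mults.lv_lt
  obtain ⟨ht1, ht2⟩ := h.mults.temps
  simp only [List.map_cons, List.map_nil] at ht1
  have hmlo : A.1.B ≤ mults := ht2 (mults, 2 * Codebook.lookup_values v.mem (g.cb v.mem i)) List.mem_cons_self
  obtain ⟨htT, htL⟩ := harena.top_eq_T ht1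
  have htemps : A.1.temps = [(A.1.T, 2 * Codebook.lookup_values v.mem (g.cb v.mem i))] := by
    rw [ht1, htT]
  have hmeq : mults = A.1.B + A.1.T := by omega
  have hfree := h_free A.2 g.frames' A.1 (2 * Codebook.lookup_values v.mem (g.cb v.mem i)) []
  u_walk hcode [hμ.vendor] until [Vorbis.L.start_decoder.cut178] span [Vorbis.L.textLo, Vorbis.L.textHi] side (first | v_side | (simp only [addr]; v_side))
  · v_inv
  · -- the LIFO precondition of `setup_temp_free(f, mults, 2·LV)`
    have hun : ShadowUntouched v.mem s_11510a.mem := by v_untouched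
    refine ⟨c14b_arena_pre hfr hcur hun ?_ ?_ ?_, Or.inr ⟨htemps, ?_, ?_, ?_⟩⟩
    · rw [w_mem]
      apply Mem.EqOn.writeLE
      · u_omega
      · u_omega
    · rw [w_rsp]
      u_omega
    · rw [w_rdi]
      exact toNat_addr _ (by omega)
    · rw [w_rsi]
      show (addr mults).toNat = _
      rw [toNat_addr _ (by omega)]
      exact hmeq
    · rw [w_rdx, Vorbis.toNat_ofBV32, BitVec.toNat_add, BitVec.toNat_ofNat]
      apply r8_congr
      omega
    · rw [w_rdi, toNat_addr _ (by omega)]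
      exact setup_temp_free.apart_of_out harena htemps hpos.objOut
  · -- 0x11510f: the block is released, the ghost arena has no temp block
    simp only [X86.User.Spec.footprint, vspec] at w_same
    have e_a : (v.reg .rsp - 8).toNat + 8 = g.R := by u_omega
    have e_sp : (s_11510a.reg .rsp).toNat + 8 = g.R := by
      rw [w_rsp_11510a]
      u_omega
    have e_rdi : (s_11510a.reg .rdi).toNat = g.f := by
      rw [w_rdi_11510a]
      exact toNat_addr _ (by omega)
    have e_rsi : (s_11510a.reg .rsi).toNat = A.1.B + A.1.T := by
      rw [w_rsi_11510a]
      show (addr mults).toNat = _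
      rw [toNat_addr _ (by omega)]
      exact hmeq
    have e_rdx : r8 ((s_11510a.reg .rdx).toNat % 2 ^ 32) = r8 (2 * Codebook.lookup_values v.mem (g.cb v.mem i)) := by
      rw [w_rdx_11510a, Vorbis.toNat_ofBV32, BitVec.toNat_add, BitVec.toNat_ofNat]
      apply r8_congr
      omega
    have hne : s_11510a.reg .rsi ≠ 0 := by
      intro h0
      rw [h0] at e_rsi
      have e0 : (0 : Word).toNat = 0 := rfl
      omega
    obtain ⟨r1, r2, r3, r4⟩ := Cur.free_call hfr hcur w_mem_11510a e_a e_sp e_rdi htemps e_rsi e_rdx w_same w_post hne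
      w_rip w_rsp (Vorbis.conv_code_eqOn w_code) w_inv (w_kept.get .r14 rfl)
    exact ReachVia.done ⟨_, { frame := r1, cur := r2, rbp := (w_kept.get .rbp rfl).trans c_rbp }⟩

/-- Segment C14b, third walk (the NULL arm): `error(f, VORBIS_outofmem)` and the jump to the epilogue: `AtERR` (`Cur.failed`). -/
theorem c14b_err
    (Lay : Layout) (hLay : Lay.hi = 0x1000000) (μ : Microarch) (hμ : UserX.MicroOK μ) (u₀ : State)
    (hcode : HasCodeNat Lay u₀ Vorbis.L.start_decoder.entry Vorbis.Code.code_start_decoder.nat Vorbis.L.start_decoder.size)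
    (h_error : ∀ (others : List Obj) (frames : List (Nat × FrameLayout)), Calls Lay μ Vorbis.WayInv (Vorbis.conv u₀) Vorbis.L.error.entry (Vorbis.Spec.error.spec others frames))
    (g : Ghost) (i : Nat) (A2 A3 Ai : Arena) (A : Arena × List Obj) (v : State)
    (h : C14bFreed u₀ g i A2 A3 Ai A v) :
    ReachVia Lay μ WayInv v (fun w => AtERR u₀ g w) := by
  have hfr := h.frame
  have hcur := h.cur
  have he := hfr.entry
  v_entry he
  simp only [depth] at he_room he_stack
  have w_rip := hfr.rip
  have w_eq : Mem.EqOn Vorbis.L.textLo Vorbis.L.textHi u₀.mem v.mem := hfr.code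
  have hdf : v.flags .df = false := (show abiInv _ from hfr.inv).1
  have hmx : v.mxcsr &&& 0x1F80 = 0x1F80 := (show abiInv _ from hfr.inv).2
  have hsse := Vorbis.sseOK_of_abiInv hfr.inv
  have hRA : g.RA = (g.e.reg .rsp).toNat := rfl
  have hpos : Pos g A := Pos.of hfr hcur
  have hm0 : MInv g i A2 A3 Ai A v.mem := MInv.of hfr hcur
  have hcw := hm0.c_where
  have p1 := hpos.r_eq
  have p2 := hpos.ra_lo
  have p3 := hpos.ra_hi
  have p4 := hpos.f_stack
  have p5 := hpos.f_hi
  have hsp : (v.reg .rsp).toNat = g.R := by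
    rw [hfr.rsp]
    exact toNat_addr _ (by omega)
  have c_r14 := hcur.r14
  have c_rbp := h.rbp
  have herr := h_error A.2 g.frames'
  u_walk hcode [hμ.vendor] until [Vorbis.L.start_decoder.cut179] span [Vorbis.L.textLo, Vorbis.L.textHi] side (first | v_side | (simp only [addr]; v_side))
  · v_inv
  · -- `error`'s precondition: the shadow layer after the push, OB1
    have hun : ShadowUntouched v.mem s_115117.mem := by v_untouched
    refine ⟨⟨?_, hfr.offText⟩, ?_⟩
    · have e8 : (s_115117.reg .rsp).toNat + 8 = g.R := by
        rw [w_rsp]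
        u_omega
      rw [e8]
      exact hfr.shadow.untouched hun
    · rw [w_rdi, toNat_addr _ (by omega)]
      exact c14b_obj_live hcur
  · -- 0x11511c: `error` returned 0 and stored `f->error`
    obtain ⟨hrax, hunp, _⟩ := w_post
    have hsame0 := w_same
    simp only [X86.User.Spec.footprint, vspec, w_rsp_115117, w_rdi_115117] at hsame0
    have hfT : (addr g.f).toNat = g.f := toNat_addr _ (by omega)
    have hun0 : ShadowUntouched v.mem s_115117.mem := by v_untouched
    have hsx : Mem.SameExcept [⟨g.R - 8, g.R⟩] v.mem s_115117.mem := by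
      rw [w_mem_115117]
      apply Mem.SameExcept.writeLE
      · u_omega
      · refine ⟨_, List.mem_cons_self, ?_, ?_⟩
        · simp only []
          u_omega
        · simp only []
          u_omega
    have hall : Mem.SameExcept [⟨g.R - 56, g.R⟩, ⟨g.f + 140, g.f + 144⟩] v.mem s_115117r.mem := by
      apply Mem.SameExcept.trans
      · apply hsx.mono
        intro w hw a h1 h2
        rw [List.mem_singleton.mp hw] at h1 h2
        simp only [] at h1 h2
        exact ⟨_, List.mem_cons_self, by simp only []; omega, by simp only []; omega⟩
      · apply hsame0.mono
        intro w hw a h1 h2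
        simp only [List.mem_cons, List.mem_nil_iff, or_false] at hw
        rcases hw with rfl | rfl
        · simp only [] at h1 h2
          refine ⟨_, List.mem_cons_self, ?_, ?_⟩
          · simp only []
            u_omega
          · simp only []
            u_omega
        · simp only [] at h1 h2
          refine ⟨_, List.mem_cons_of_mem _ List.mem_cons_self, ?_, ?_⟩
          · simp only []
            omega
          · simp only []
            omega
    have hunAll : ShadowUntouched v.mem s_115117r.mem := Mem.EqOn.trans hun0 hunp
    v_after_call w_rsp_115117 w_mem_115117
    u_walk hcode [hμ.vendor] until [Vorbis.L.start_decoder.cut4] span [Vorbis.L.textLo, Vorbis.L.textHi] side (first | v_side | (simp only [addr]; v_side))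
    -- 0x113b22: the epilogue, `eax = 0`; the memory is that of `error`'s return
    rw [← w_mem] at hall hunAll
    have hq : ∀ x, x ∈ [(⟨g.R - 56, g.R⟩ : Span), ⟨g.f + 140, g.f + 144⟩] → OkWin g Ai A (g.cb v.mem i) x := by
      intro x hx
      simp only [List.mem_cons, List.mem_nil_iff, or_false] at hx
      left
      unfold OkWin0
      rcases hx with rfl | rfl
      · left
        simp only []
        omega
      · right
        right
        right
        right
        right
        right
        left
        simp only []
        omega
    have hb : Bits (g.Blk A) g.len s_11511c.mem g.f := by
      apply bits_kept hpos hm0.sd.bits hall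
      intro x hx
      simp only [List.mem_cons, List.mem_nil_iff, or_false] at hx
      rcases hx with rfl | rfl
      · left
        simp only []
        omega
      · right
        right
        left
        simp only []
        omega
    have hinv : (conv u₀).inv s_11511c := by v_inv
    have hF := Frame.step (pc' := pc_ERR) hfr hcur hall hunAll hq hb w_rip w_rsp w_eq hinv
    obtain ⟨hC, _⟩ := Cur.step hfr hcur hall hunAll hq hb (w_kept.get .r14 rfl)
    refine ReachVia.done ⟨A, { frame := hF, hand := hC.hand, result := Or.inl ⟨?_, hC.failed⟩ }⟩
    rw [w_rax]
    rfl

end Vorbis.Spec.start_decoder_C14b
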